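-- pv_equiv track=rewrite | github.com/CrisBarreraml/Estructura_de_Datos | MezclaEquilibrada.py | dividir_en_archivos
-- ===== SOURCE A (Python) =====
-- def dividir_en_archivos(lista):
--     archivo1 = []
--     archivo2 = []
--     toggle = True
--     for i in range(0, len(lista), 2):
--         sublista = sorted(lista[i:i+2])
--         if toggle:
--             archivo1.append(sublista)
--         else:
--             archivo2.append(sublista)
--         toggle = not toggle
--     return archivo1, archivo2
-- ===== SOURCE B (Python) =====
-- def dividir_en_archivos(lista):
--     pares = [sorted(lista[i:i+2]) for i in range(0, len(lista), 2)]
--     return pares[::2], pares[1:][::2]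
-- ===== Notes on version B (the rewrite author's own statement) =====
-- stated objective: simpler
-- what changed: Builds the full list of sorted pairs in one comprehension, then distributes them to the two files by slicing (pares[::2] / pares[1:][::2]) instead of threading a boolean toggle through a single loop with an alternating branch.
import Mathlib
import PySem

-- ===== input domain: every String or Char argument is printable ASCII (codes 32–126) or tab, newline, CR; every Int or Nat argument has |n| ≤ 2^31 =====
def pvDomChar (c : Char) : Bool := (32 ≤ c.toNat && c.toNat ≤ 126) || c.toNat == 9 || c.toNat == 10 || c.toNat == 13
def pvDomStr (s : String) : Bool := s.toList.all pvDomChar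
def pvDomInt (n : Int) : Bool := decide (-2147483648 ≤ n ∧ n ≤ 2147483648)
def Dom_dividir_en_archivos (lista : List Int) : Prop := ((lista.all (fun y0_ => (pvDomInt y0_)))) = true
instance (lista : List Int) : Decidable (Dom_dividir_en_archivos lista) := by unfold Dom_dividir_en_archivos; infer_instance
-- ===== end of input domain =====

-- B builds the list of sorted pairs first, then distributes them by slicing (pares[::2] / pares[1:][::2])
-- instead of threading a boolean toggle through one loop; objective: simpler.


-- ===== PORT A =====
-- for i in range(0, len(lista), 2): sublista = sorted(lista[i:i+2]); append to archivo1/archivo2 by toggle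
def dividir_en_archivos (lista : List Int) : List (List Int) × List (List Int) :=
  let r := (PySem.List.pyRange 0 (lista.length : Int) 2).foldl
    (fun (st : List (List Int) × List (List Int) × Bool) i =>
      let sublista := PySem.List.sorted (PySem.List.slice lista (some i) (some (i + 2))) id
      if st.2.2 then (st.1 ++ [sublista], st.2.1, !st.2.2)
      else (st.1, st.2.1 ++ [sublista], !st.2.2))
    ([], [], true)
  (r.1, r.2.1)

-- ===== PORT B =====
-- pares = [sorted(lista[i:i+2]) for i in range(0, len(lista), 2)]; return pares[::2], pares[1:][::2]
def dividir_en_archivos_alt (lista : List Int) : List (List Int) × List (List Int) :=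
  let pares := (PySem.List.pyRange 0 (lista.length : Int) 2).map
    (fun i => PySem.List.sorted (PySem.List.slice lista (some i) (some (i + 2))) id)
  ((PySem.List.slice? pares none none 2).getD [],
   (PySem.List.slice? (PySem.List.slice pares (some 1) none) none none 2).getD [])

-- ===== PRECONDITION & SPEC =====
def Spec_dividir_en_archivos (lista : List Int) (out : List (List Int) × List (List Int)) : Prop := out = dividir_en_archivos_alt lista
instance (lista : List Int) (out : List (List Int) × List (List Int)) : Decidable (Spec_dividir_en_archivos lista out) := by unfold Spec_dividir_en_archivos; infer_instance

-- ===== CLAIM (what is proved, stated in full; the proofs are below) =====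
def Claim_equal_dividir_en_archivos : Prop := ∀ (lista : List Int), Dom_dividir_en_archivos lista → Spec_dividir_en_archivos lista (dividir_en_archivos lista)

-- ===== LEMMAS AND PROOFS =====

/-- The even-position elements of a list (positions 0, 2, 4, …). -/
def pvEvens {α : Type} : List α → List α
  | [] => []
  | [x] => [x]
  | x :: _ :: t => x :: pvEvens t

theorem pvEvens_cons {α : Type} (x : α) (xs : List α) :
    pvEvens (x :: xs) = x :: pvEvens xs.tail := by
  cases xs <;> rfl

/-- Extended slice `ps[::2]` is `pvEvens ps`. -/
theorem pv_filterMap_evens {α : Type} : ∀ (ps : List α),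
    (List.range ((ps.length + 1) / 2)).filterMap (fun k => ps[2 * k]?) = pvEvens ps
  | [] => by simp [pvEvens]
  | [x] => by simp [pvEvens, List.range_succ]
  | x :: y :: t => by
    have ih := pv_filterMap_evens t
    have hlen : ((x :: y :: t).length + 1) / 2 = (t.length + 1) / 2 + 1 := by
      simp; omega
    rw [hlen, List.range_succ_eq_map, List.filterMap_cons, List.filterMap_map]
    simp only [Function.comp]
    have : ∀ k : Nat, (x :: y :: t)[2 * (k + 1)]? = t[2 * k]? := by
      intro k
      have h2 : 2 * (k + 1) = 2 * k + 1 + 1 := by omega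
      rw [h2]; simp
    simp only [this]
    simpa [pvEvens] using ih

theorem pv_slice_two {α : Type} (ps : List α) :
    PySem.List.slice? ps none none 2 = some (pvEvens ps) := by
  rw [PySem.List.slice?]
  simp only [PySem.List.sliceIndices]
  norm_num
  have hc : (if 0 < ps.length then (((ps.length : Int) + 2 - 1) / 2).toNat else 0)
      = (ps.length + 1) / 2 := by
    split_ifs with h <;> omega
  rw [hc]
  have harg : ∀ k : Nat, ps[(2 * (k : Int)).toNat]? = ps[2 * k]? := by
    intro k
    congr 1
  simpa only [harg] using pv_filterMap_evens ps

/-- A's toggle loop appends the even-position elements to the first accumulator and the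
    odd-position ones to the second (swapped when the toggle starts false). -/
theorem pv_foldl_toggle {α : Type} : ∀ (ps : List α) (a1 a2 : List α) (t : Bool),
    (ps.foldl
      (fun (st : List α × List α × Bool) x =>
        if st.2.2 then (st.1 ++ [x], st.2.1, !st.2.2) else (st.1, st.2.1 ++ [x], !st.2.2))
      (a1, a2, t)).1 = a1 ++ (if t then pvEvens ps else pvEvens ps.tail) ∧
    (ps.foldl
      (fun (st : List α × List α × Bool) x =>
        if st.2.2 then (st.1 ++ [x], st.2.1, !st.2.2) else (st.1, st.2.1 ++ [x], !st.2.2))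
      (a1, a2, t)).2.1 = a2 ++ (if t then pvEvens ps.tail else pvEvens ps)
  | [], a1, a2, t => by simp [pvEvens]
  | x :: xs, a1, a2, t => by
    cases t with
    | true =>
      have ih := pv_foldl_toggle xs (a1 ++ [x]) a2 false
      simpa [pvEvens_cons] using ih
    | false =>
      have ih := pv_foldl_toggle xs a1 (a2 ++ [x]) true
      simpa [pvEvens_cons] using ih

-- ===== VERDICT (by name: the statement is the Claim_ definition above) =====
theorem dividir_en_archivos_spec : Claim_equal_dividir_en_archivos := by
  intro lista _
  unfold Spec_dividir_en_archivos dividir_en_archivos dividir_en_archivos_alt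
  dsimp only
  rw [← List.foldl_map
      (f := fun i => PySem.List.sorted (PySem.List.slice lista (some i) (some (i + 2))) id)
      (g := fun (st : List (List Int) × List (List Int) × Bool) x =>
        if st.2.2 then (st.1 ++ [x], st.2.1, !st.2.2) else (st.1, st.2.1 ++ [x], !st.2.2))]
  set ps := (PySem.List.pyRange 0 (lista.length : Int) 2).map
    (fun i => PySem.List.sorted (PySem.List.slice lista (some i) (some (i + 2))) id) with hps
  have hA := pv_foldl_toggle ps [] [] true
  rw [pv_slice_two, PySem.List.slice_from ps (by norm_num : (0:Int) ≤ 1), pv_slice_two]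
  refine Prod.ext ?_ ?_
  · simpa using hA.1
  · simpa [List.drop_one] using hA.2
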